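-- pv_equiv track=rewrite | github.com/sealinglip/leecode | 1764.通过连接另一个数组的子数组得到一个数组.py | canChoose
-- ===== SOURCE A (Python) =====
-- from typing import List
--
-- def canChoose(groups: List[List[int]], nums: List[int]) -> bool:
--     # 直接双指针匹配
--     n, gn = len(nums), len(groups)
--     # p1 = p2 = i = 0
--
--     # while p1 < n and i < gn:
--     #     # 待匹配groups[i]
--     #     group = groups[i]
--     #     gl = len(group)
--     #     while p1 < n and p2 < gl:
--     #         if nums[p1] == group[p2]:
--     #             p1 += 1
--     #             p2 += 1
--     #         else:
--     #             p1 -= p2-1  # 从开始匹配的起点往后移一个位置重新匹配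
--     #             p2 = 0
--     #     if p2 == gl:
--     #         p2 = 0
--     #         i += 1
--
--     # return i == gn
--
--     # 改写
--     p1 = 0
--     for g in groups:
--         gl = len(g)
--         while p1 + gl <= n:
--             if nums[p1: p1 + gl] == g:
--                 p1 += gl
--                 break
--             p1 += 1
--         else:
--             return False
--     return True
-- ===== SOURCE B (Python) =====
-- from typing import List
--
-- def canChoose(groups: List[List[int]], nums: List[int]) -> bool:
--     # Element-wise two-pointer matcher with backtracking: no per-candidate slice is built.
--     n = len(nums)
--     s = 0                       # candidate start of the current group in nums
--     for g in groups:
--         p2 = 0                  # length of the prefix of g already matched at s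
--         while p2 != len(g):
--             if s + p2 >= n:
--                 return False
--             if nums[s + p2] == g[p2]:
--                 p2 += 1
--             else:
--                 s += 1
--                 p2 = 0
--         s += p2                 # consume the matched group
--     return True
-- ===== Notes on version B (the rewrite author's own statement) =====
-- stated objective: alternative
-- what changed: A compares a freshly built slice nums[p1:p1+gl] against each group at every candidate start; B is a single element-wise two-pointer state machine that matches one element at a time and backtracks the start pointer on mismatch, never building a slice.
import Mathlib
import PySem

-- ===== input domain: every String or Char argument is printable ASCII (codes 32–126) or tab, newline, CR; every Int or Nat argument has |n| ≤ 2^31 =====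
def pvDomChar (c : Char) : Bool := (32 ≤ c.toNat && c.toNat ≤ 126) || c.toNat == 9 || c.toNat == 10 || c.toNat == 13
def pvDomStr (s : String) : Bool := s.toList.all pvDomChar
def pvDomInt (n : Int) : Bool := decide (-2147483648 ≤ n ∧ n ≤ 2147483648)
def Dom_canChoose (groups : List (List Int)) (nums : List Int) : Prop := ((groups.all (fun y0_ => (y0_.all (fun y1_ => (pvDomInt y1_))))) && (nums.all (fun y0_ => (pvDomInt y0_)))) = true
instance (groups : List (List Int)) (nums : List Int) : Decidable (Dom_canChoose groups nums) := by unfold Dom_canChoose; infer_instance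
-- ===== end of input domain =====

-- B replaces A's per-candidate slice comparison by an element-wise two-pointer matcher
-- with backtracking (objective: alternative; same worst-case cost, no slice allocation).

-- ===== PORT A =====
-- A's inner 'while p1 + gl <= n: if nums[p1:p1+gl] == g: p1 += gl; break; p1 += 1; else: return False'
-- (none = the 'else: return False' path)
def pvSearchA (nums g : List Int) (n p1 : Nat) : Option Nat :=
  if p1 + g.length ≤ n then
    if PySem.List.slice nums (some (p1 : Int)) (some ((p1 : Int) + (g.length : Int))) = g then
      some (p1 + g.length)
    else
      pvSearchA nums g n (p1 + 1)
  else
    none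
termination_by n + 1 - p1
decreasing_by omega

-- A's 'for g in groups' loop carrying p1
def pvGoA (nums : List Int) (n : Nat) : List (List Int) → Nat → Bool
  | [], _ => true
  | g :: gs, p1 =>
    match pvSearchA nums g n p1 with
    | some p1' => pvGoA nums n gs p1'
    | none => false

def canChoose (groups : List (List Int)) (nums : List Int) : Bool :=
  pvGoA nums nums.length groups 0

-- ===== PORT B =====
-- B's inner 'while p2 != len(g)' loop; nums[s+p2] / g[p2] are ported with getD: on every
-- state reachable from (s, 0) the guards ensure s+p2 < n = len nums and p2 < len g,
-- so the accesses are exact (Python never raises here).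
def pvScanB (nums g : List Int) (n s p2 : Nat) : Option Nat :=
  if p2 = g.length then some (s + p2)
  else if n ≤ s + p2 then none
  else if nums.getD (s + p2) 0 = g.getD p2 0 then
    pvScanB nums g n s (p2 + 1)
  else
    pvScanB nums g n (s + 1) 0
termination_by (n - s, n - (s + p2))
decreasing_by
  · exact Prod.Lex.right _ (by omega)
  · exact Prod.Lex.left _ _ (by omega)

-- B's 'for g in groups' loop carrying s
def pvGoB (nums : List Int) (n : Nat) : List (List Int) → Nat → Bool
  | [], _ => true
  | g :: gs, s =>
    match pvScanB nums g n s 0 with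
    | some s' => pvGoB nums n gs s'
    | none => false

def canChoose_alt (groups : List (List Int)) (nums : List Int) : Bool :=
  pvGoB nums nums.length groups 0

-- ===== PRECONDITION & SPEC =====
def Spec_canChoose (groups : List (List Int)) (nums : List Int) (out : Bool) : Prop := out = canChoose_alt groups nums
instance (groups : List (List Int)) (nums : List Int) (out : Bool) : Decidable (Spec_canChoose groups nums out) := by unfold Spec_canChoose; infer_instance

-- ===== CLAIM (what is proved, stated in full; the proofs are below) =====
def Claim_equal_canChoose : Prop := ∀ (groups : List (List Int)) (nums : List Int), Dom_canChoose groups nums → Spec_canChoose groups nums (canChoose groups nums)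

-- ===== LEMMAS AND PROOFS =====

-- A's slice nums[p1:p1+gl] is (nums.drop p1).take gl
lemma slice_drop_take (nums : List Int) (p1 gl : Nat) :
    PySem.List.slice nums (some (p1 : Int)) (some ((p1 : Int) + (gl : Int))) = (nums.drop p1).take gl := by
  simpa using PySem.List.slice_natCast_add nums p1 gl

-- a fully matched prefix makes the slice equal to g
lemma take_drop_eq_of_pointwise (nums g : List Int) (s : Nat)
    (hle : s + g.length ≤ nums.length)
    (hpt : ∀ j, j < g.length → nums.getD (s + j) 0 = g.getD j 0) :
    (nums.drop s).take g.length = g := by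
  apply List.ext_getElem
  · simp; omega
  · intro j h1 h2
    have hj : j < g.length := by simpa using h2
    have := hpt j hj
    rw [List.getD_eq_getElem _ _ (by omega), List.getD_eq_getElem _ _ hj] at this
    simpa [List.getElem_drop] using this

-- a mismatch at offset p2 < gl refutes the slice comparison
lemma slice_ne_of_mismatch (nums g : List Int) (s p2 : Nat)
    (hle : s + g.length ≤ nums.length) (hp2 : p2 < g.length)
    (hne : nums.getD (s + p2) 0 ≠ g.getD p2 0) :
    (nums.drop s).take g.length ≠ g := by
  intro h
  apply hne
  have h2 : ((nums.drop s).take g.length).getD p2 0 = g.getD p2 0 := by rw [h]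
  rw [List.getD_eq_getElem _ _ (by simp; omega), List.getD_eq_getElem _ _ hp2] at h2
  rw [List.getD_eq_getElem _ _ (by omega), List.getD_eq_getElem _ _ hp2]
  simpa [List.getElem_drop] using h2

-- core: the two-pointer scan from a partially matched state equals A's slice search
-- from the candidate start s
lemma scan_eq_search (nums g : List Int) (s p2 : Nat) :
    p2 ≤ g.length → (∀ j, j < p2 → nums.getD (s + j) 0 = g.getD j 0) →
    s + p2 ≤ nums.length →
    pvScanB nums g nums.length s p2 = pvSearchA nums g nums.length s := by
  fun_induction pvScanB nums g nums.length s p2 with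
  | case1 s =>
    intro _ hpt hle
    rw [pvSearchA, if_pos hle, slice_drop_take,
      if_pos (take_drop_eq_of_pointwise nums g s hle hpt)]
  | case2 s p2 hp2 hn =>
    intro hle2 _ hle
    rw [pvSearchA, if_neg (by omega)]
  | case3 s p2 hp2 hn heq ih =>
    intro hle2 hpt hle
    apply ih (by omega) ?_ (by omega)
    intro j hj
    rcases Nat.lt_succ_iff_lt_or_eq.mp hj with h | h
    · exact hpt j h
    · subst h; exact heq
  | case4 s p2 hp2 hn hne ih =>
    intro hle2 hpt hle
    rw [ih (by omega) (by omega) (by omega)]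
    conv_rhs => rw [pvSearchA]
    by_cases hg : s + g.length ≤ nums.length
    · rw [if_pos hg, slice_drop_take,
        if_neg (slice_ne_of_mismatch nums g s p2 hg (by omega) hne)]
    · rw [if_neg hg, pvSearchA, if_neg (by omega)]

-- a successful search ends at a position ≤ n
lemma searchA_le (nums g : List Int) (n p1 p1' : Nat) :
    pvSearchA nums g n p1 = some p1' → p1' ≤ n := by
  fun_induction pvSearchA nums g n p1 with
  | case1 p1 hle hsl => intro h; simp at h; omega
  | case2 p1 hle hsl ih => exact ih
  | case3 p1 hle => intro h; simp at h

-- the group loops agree from any start position ≤ n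
lemma go_eq (nums : List Int) (gs : List (List Int)) :
    ∀ s, s ≤ nums.length → pvGoB nums nums.length gs s = pvGoA nums nums.length gs s := by
  induction gs with
  | nil => intro s _; rfl
  | cons g gs ih =>
    intro s hs
    show (match pvScanB nums g nums.length s 0 with
          | some s' => pvGoB nums nums.length gs s'
          | none => false) = _
    rw [scan_eq_search nums g s 0 (by omega) (by omega) (by omega)]
    cases h : pvSearchA nums g nums.length s with
    | none => simp [pvGoA, h]
    | some s' => simp [pvGoA, h, ih s' (searchA_le nums g _ s s' h)]

-- ===== VERDICT (by name: the statement is the Claim_ definition above) =====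
theorem canChoose_spec : Claim_equal_canChoose := by
  intro groups nums _
  unfold Spec_canChoose canChoose canChoose_alt
  exact (go_eq nums groups 0 (by omega)).symm
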